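-- pv_equiv track=rewrite | github.com/phoenixrebirthhealer/Soul-Blueprint | astrology_humandesign.py | _gates_to_centers
-- ===== SOURCE A (Python) =====
-- from typing import Dict, List, Optional, Tuple
--
-- CENTER_GATE_MAP = {
--     "Head": {64, 61, 63},
--     "Ajna": {4, 17, 11, 24, 43, 47},
--     "Throat": {12, 16, 20, 23, 31, 33, 35, 45, 56, 62},
--     "G-Center": {1, 2, 7, 10, 13, 15, 25, 46},
--     "Heart/Ego": {21, 26, 40, 51},
--     "Solar Plexus": {6, 22, 30, 36, 37, 49, 55},
--     "Sacral": {3, 5, 9, 14, 27, 29, 34, 59},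
--     "Spleen": {18, 28, 32, 44, 48, 50, 57},
--     "Root": {39, 52, 53, 54, 58, 60, 38, 41},
-- }
--
-- CHANNEL_DEFINITIONS = [
--     {"name": "The Channel of Inspiration", "gates": (1, 8), "centers": ("G-Center", "Throat")},
--     {"name": "The Channel of the Beat", "gates": (2, 14), "centers": ("G-Center", "Sacral")},
--     {"name": "The Channel of Mutation", "gates": (3, 60), "centers": ("Root", "Sacral")},
--     {"name": "The Channel of Logic", "gates": (4, 63), "centers": ("Ajna", "Head")},
--     {"name": "The Channel of Rhythm", "gates": (5, 15), "centers": ("Sacral", "G-Center")},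
--     {"name": "The Channel of Intimacy", "gates": (6, 59), "centers": ("Throat", "Sacral")},
--     {"name": "The Channel of the Alpha", "gates": (7, 31), "centers": ("G-Center", "Throat")},
--     {"name": "The Channel of Struggle", "gates": (9, 52), "centers": ("Sacral", "Root")},
--     {"name": "The Channel of Awakening", "gates": (10, 20), "centers": ("G-Center", "Throat")},
--     {"name": "The Channel of Curiosity", "gates": (11, 56), "centers": ("Ajna", "Throat")},
--     {"name": "The Channel of Openness", "gates": (12, 22), "centers": ("Throat", "G-Center")},
--     {"name": "The Channel of the Prodigal", "gates": (13, 33), "centers": ("G-Center", "Throat")},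
--     {"name": "The Channel of Power", "gates": (16, 48), "centers": ("Throat", "Spleen")},
--     {"name": "The Channel of Judgment", "gates": (18, 58), "centers": ("Spleen", "Root")},
--     {"name": "The Channel of Synthesis", "gates": (19, 49), "centers": ("G-Center", "Solar Plexus")},
--     {"name": "The Channel of Charisma", "gates": (20, 34), "centers": ("Throat", "Sacral")},
--     {"name": "The Channel of Community", "gates": (21, 45), "centers": ("Heart/Ego", "Throat")},
--     {"name": "The Channel of Structuring", "gates": (23, 43), "centers": ("Throat", "Ajna")},
--     {"name": "The Channel of the Brainwave", "gates": (24, 61), "centers": ("Ajna", "Head")},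
--     {"name": "The Channel of Initiation", "gates": (25, 51), "centers": ("G-Center", "Heart/Ego")},
--     {"name": "The Channel of Surrender", "gates": (26, 44), "centers": ("Heart/Ego", "Throat")},
--     {"name": "The Channel of Preservation", "gates": (27, 50), "centers": ("Sacral", "Spleen")},
--     {"name": "The Channel of Struggle", "gates": (28, 38), "centers": ("Spleen", "Root")},
--     {"name": "The Channel of Discovery", "gates": (29, 46), "centers": ("Sacral", "G-Center")},
--     {"name": "The Channel of Recognition", "gates": (30, 41), "centers": ("Solar Plexus", "Root")},
--     {"name": "The Channel of Transformation", "gates": (32, 54), "centers": ("Spleen", "Root")},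
--     {"name": "The Channel of Exploration", "gates": (34, 10), "centers": ("Sacral", "G-Center")},
--     {"name": "The Channel of Power", "gates": (34, 57), "centers": ("Sacral", "Spleen")},
--     {"name": "The Channel of Perfected Form", "gates": (57, 10), "centers": ("Spleen", "G-Center")},
--     {"name": "The Channel of Transitoriness", "gates": (35, 36), "centers": ("Sacral", "Root")},
--     {"name": "The Channel of Community", "gates": (37, 40), "centers": ("Heart/Ego", "Root")},
--     {"name": "The Channel of Emoting", "gates": (39, 55), "centers": ("Root", "Solar Plexus")},
--     {"name": "The Channel of Maturation", "gates": (42, 53), "centers": ("Root", "Spleen")},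
--     {"name": "The Channel of Synthesis", "gates": (49, 19), "centers": ("Solar Plexus", "G-Center")},
--     {"name": "The Channel of Abstraction", "gates": (47, 64), "centers": ("Ajna", "Head")},
--     {"name": "The Channel of Details", "gates": (62, 17), "centers": ("Throat", "Ajna")},
-- ]
--
-- def _gates_to_centers(active_gates: set) -> Dict[str, bool]:
--     centers = {center: False for center in CENTER_GATE_MAP}
--     for channel in CHANNEL_DEFINITIONS:
--         a, b = channel["gates"]
--         if a in active_gates and b in active_gates:
--             left, right = channel["centers"]
--             centers[left] = True
--             centers[right] = True
--     return centers
-- ===== SOURCE B (Python) =====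
-- from typing import Dict
--
-- # Inverted index, precomputed once from CHANNEL_DEFINITIONS: for each center (in
-- # CENTER_GATE_MAP order), the gate-pairs of the channels touching it, in channel order.
-- CENTER_CHANNELS = {
--     "Head": [(4, 63), (24, 61), (47, 64)],
--     "Ajna": [(4, 63), (11, 56), (23, 43), (24, 61), (47, 64), (62, 17)],
--     "Throat": [(1, 8), (6, 59), (7, 31), (10, 20), (11, 56), (12, 22), (13, 33),
--                (16, 48), (20, 34), (21, 45), (23, 43), (26, 44), (62, 17)],
--     "G-Center": [(1, 8), (2, 14), (5, 15), (7, 31), (10, 20), (12, 22), (13, 33),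
--                  (19, 49), (25, 51), (29, 46), (34, 10), (57, 10), (49, 19)],
--     "Heart/Ego": [(21, 45), (25, 51), (26, 44), (37, 40)],
--     "Solar Plexus": [(19, 49), (30, 41), (39, 55), (49, 19)],
--     "Sacral": [(2, 14), (3, 60), (5, 15), (6, 59), (9, 52), (20, 34), (27, 50),
--                (29, 46), (34, 10), (34, 57), (35, 36)],
--     "Spleen": [(16, 48), (18, 58), (27, 50), (28, 38), (32, 54), (34, 57),
--                (57, 10), (42, 53)],
--     "Root": [(3, 60), (9, 52), (18, 58), (28, 38), (30, 41), (32, 54), (35, 36),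
--              (37, 40), (39, 55), (42, 53)],
-- }
--
-- def _gates_to_centers(active_gates: set) -> Dict[str, bool]:
--     return {
--         center: any(a in active_gates and b in active_gates for (a, b) in pairs)
--         for center, pairs in CENTER_CHANNELS.items()
--     }
-- ===== Notes on version B (the rewrite author's own statement) =====
-- stated objective: alternative
-- what changed: Replaces A's channel-loop that mutates a centers dict with a precomputed inverted center->gate-pairs table and a single comprehension over the 9 centers, each value an any() over that center's pairs.
import Mathlib
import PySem

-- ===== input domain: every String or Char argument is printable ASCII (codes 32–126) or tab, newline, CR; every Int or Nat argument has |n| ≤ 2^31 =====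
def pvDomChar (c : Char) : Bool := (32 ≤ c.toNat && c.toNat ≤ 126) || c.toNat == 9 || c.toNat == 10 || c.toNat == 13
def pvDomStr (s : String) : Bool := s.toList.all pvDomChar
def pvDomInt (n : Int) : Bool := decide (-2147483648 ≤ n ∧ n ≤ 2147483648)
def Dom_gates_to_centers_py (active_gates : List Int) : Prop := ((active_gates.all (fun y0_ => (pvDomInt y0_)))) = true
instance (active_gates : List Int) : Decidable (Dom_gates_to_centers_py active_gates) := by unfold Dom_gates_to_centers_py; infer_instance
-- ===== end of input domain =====

-- B replaces A's channel-loop writing True into a centers dict by a precomputed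
-- inverted center→gate-pairs table and one pass over the 9 centers (objective: alternative).


-- ===== PORT A =====
-- keys of CENTER_GATE_MAP in insertion order (the gate sets themselves are never read)
def pvCenters : List String :=
  ["Head", "Ajna", "Throat", "G-Center", "Heart/Ego", "Solar Plexus", "Sacral", "Spleen", "Root"]

-- CHANNEL_DEFINITIONS: (name, gates, centers) per channel (in list order)
def pvChannels : List (String × (Int × Int) × (String × String)) :=
  [ ("The Channel of Inspiration", (1, 8), ("G-Center", "Throat")),
    ("The Channel of the Beat", (2, 14), ("G-Center", "Sacral")),
    ("The Channel of Mutation", (3, 60), ("Root", "Sacral")),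
    ("The Channel of Logic", (4, 63), ("Ajna", "Head")),
    ("The Channel of Rhythm", (5, 15), ("Sacral", "G-Center")),
    ("The Channel of Intimacy", (6, 59), ("Throat", "Sacral")),
    ("The Channel of the Alpha", (7, 31), ("G-Center", "Throat")),
    ("The Channel of Struggle", (9, 52), ("Sacral", "Root")),
    ("The Channel of Awakening", (10, 20), ("G-Center", "Throat")),
    ("The Channel of Curiosity", (11, 56), ("Ajna", "Throat")),
    ("The Channel of Openness", (12, 22), ("Throat", "G-Center")),
    ("The Channel of the Prodigal", (13, 33), ("G-Center", "Throat")),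
    ("The Channel of Power", (16, 48), ("Throat", "Spleen")),
    ("The Channel of Judgment", (18, 58), ("Spleen", "Root")),
    ("The Channel of Synthesis", (19, 49), ("G-Center", "Solar Plexus")),
    ("The Channel of Charisma", (20, 34), ("Throat", "Sacral")),
    ("The Channel of Community", (21, 45), ("Heart/Ego", "Throat")),
    ("The Channel of Structuring", (23, 43), ("Throat", "Ajna")),
    ("The Channel of the Brainwave", (24, 61), ("Ajna", "Head")),
    ("The Channel of Initiation", (25, 51), ("G-Center", "Heart/Ego")),
    ("The Channel of Surrender", (26, 44), ("Heart/Ego", "Throat")),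
    ("The Channel of Preservation", (27, 50), ("Sacral", "Spleen")),
    ("The Channel of Struggle", (28, 38), ("Spleen", "Root")),
    ("The Channel of Discovery", (29, 46), ("Sacral", "G-Center")),
    ("The Channel of Recognition", (30, 41), ("Solar Plexus", "Root")),
    ("The Channel of Transformation", (32, 54), ("Spleen", "Root")),
    ("The Channel of Exploration", (34, 10), ("Sacral", "G-Center")),
    ("The Channel of Power", (34, 57), ("Sacral", "Spleen")),
    ("The Channel of Perfected Form", (57, 10), ("Spleen", "G-Center")),
    ("The Channel of Transitoriness", (35, 36), ("Sacral", "Root")),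
    ("The Channel of Community", (37, 40), ("Heart/Ego", "Root")),
    ("The Channel of Emoting", (39, 55), ("Root", "Solar Plexus")),
    ("The Channel of Maturation", (42, 53), ("Root", "Spleen")),
    ("The Channel of Synthesis", (49, 19), ("Solar Plexus", "G-Center")),
    ("The Channel of Abstraction", (47, 64), ("Ajna", "Head")),
    ("The Channel of Details", (62, 17), ("Throat", "Ajna")) ]

-- A: centers = {c: False}; for each channel, if both gates active set both its centers True
def gates_to_centers_py (active_gates : List Int) : List (String × Bool) :=
  let centers := PySem.Dict.ofList (pvCenters.map (fun c => (c, false)))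
  let centers := pvChannels.foldl
    (fun d ch =>
      if active_gates.contains ch.2.1.1 && active_gates.contains ch.2.1.2 then
        (d.insert ch.2.2.1 true).insert ch.2.2.2 true
      else d)
    centers
  centers.items

-- ===== PORT B =====
-- CENTER_CHANNELS: precomputed inverted table, each center → its channels' gate-pairs
def pvCenterChannels : List (String × List (Int × Int)) :=
  [ ("Head", [(4, 63), (24, 61), (47, 64)]),
    ("Ajna", [(4, 63), (11, 56), (23, 43), (24, 61), (47, 64), (62, 17)]),
    ("Throat", [(1, 8), (6, 59), (7, 31), (10, 20), (11, 56), (12, 22), (13, 33),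
                (16, 48), (20, 34), (21, 45), (23, 43), (26, 44), (62, 17)]),
    ("G-Center", [(1, 8), (2, 14), (5, 15), (7, 31), (10, 20), (12, 22), (13, 33),
                  (19, 49), (25, 51), (29, 46), (34, 10), (57, 10), (49, 19)]),
    ("Heart/Ego", [(21, 45), (25, 51), (26, 44), (37, 40)]),
    ("Solar Plexus", [(19, 49), (30, 41), (39, 55), (49, 19)]),
    ("Sacral", [(2, 14), (3, 60), (5, 15), (6, 59), (9, 52), (20, 34), (27, 50),
                (29, 46), (34, 10), (34, 57), (35, 36)]),
    ("Spleen", [(16, 48), (18, 58), (27, 50), (28, 38), (32, 54), (34, 57),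
                (57, 10), (42, 53)]),
    ("Root", [(3, 60), (9, 52), (18, 58), (28, 38), (30, 41), (32, 54), (35, 36),
              (37, 40), (39, 55), (42, 53)]) ]

-- B: one pass over the table; a center is defined iff one of its pairs is fully active
def gates_to_centers_py_alt (active_gates : List Int) : List (String × Bool) :=
  pvCenterChannels.map (fun cp =>
    (cp.1, cp.2.any (fun p => active_gates.contains p.1 && active_gates.contains p.2)))

-- ===== PRECONDITION & SPEC =====
def Spec_gates_to_centers_py (active_gates : List Int) (out : List (String × Bool)) : Prop := out = gates_to_centers_py_alt active_gates
instance (active_gates : List Int) (out : List (String × Bool)) : Decidable (Spec_gates_to_centers_py active_gates out) := by unfold Spec_gates_to_centers_py; infer_instance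

-- ===== CLAIM (what is proved, stated in full; the proofs are below) =====
def Claim_equal_gates_to_centers_py : Prop := ∀ (active_gates : List Int), Dom_gates_to_centers_py active_gates → Spec_gates_to_centers_py active_gates (gates_to_centers_py active_gates)

-- ===== LEMMAS AND PROOFS =====

-- A's loop body, abstracted over the gate-activity test
def pvStep (cond : Int × Int → Bool) (d : PySem.Dict String Bool)
    (ch : String × (Int × Int) × (String × String)) : PySem.Dict String Bool :=
  if cond ch.2.1 then (d.insert ch.2.2.1 true).insert ch.2.2.2 true else d

-- one step of A's loop, read through getD
theorem pvStep_getD (cond : Int × Int → Bool) (d : PySem.Dict String Bool)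
    (ch : String × (Int × Int) × (String × String)) (k : String) :
    (pvStep cond d ch).getD k false
      = (d.getD k false || (cond ch.2.1 && (ch.2.2.1 == k || ch.2.2.2 == k))) := by
  unfold pvStep
  by_cases hc : cond ch.2.1
  · simp only [hc, if_pos, PySem.Dict.getD_insert, Bool.true_and]
    by_cases h2 : k = ch.2.2.2
    · simp [h2]
    · rw [if_neg h2]
      by_cases h1 : k = ch.2.2.1
      · simp [h1]
      · have e1 : (ch.2.2.1 == k) = false := by simp; exact Ne.symm h1
        have e2 : (ch.2.2.2 == k) = false := by simp; exact Ne.symm h2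
        rw [if_neg h1]
        simp [e1, e2]
  · simp [hc]

-- the whole fold, read through getD: initial value OR-ed with "some channel touching k fires"
theorem pvFold_getD (cond : Int × Int → Bool)
    (chs : List (String × (Int × Int) × (String × String)))
    (d : PySem.Dict String Bool) (k : String) :
    (chs.foldl (pvStep cond) d).getD k false
      = (d.getD k false || chs.any (fun ch => cond ch.2.1 && (ch.2.2.1 == k || ch.2.2.2 == k))) := by
  induction chs generalizing d with
  | nil => simp
  | cons c cs ih =>
    simp only [List.foldl_cons, List.any_cons, ih, pvStep_getD, Bool.or_assoc]

-- one step preserves the key list when both written centers are already keys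
theorem pvStep_keys (cond : Int × Int → Bool) (d : PySem.Dict String Bool)
    (ch : String × (Int × Int) × (String × String))
    (h1 : ch.2.2.1 ∈ d.keys) (h2 : ch.2.2.2 ∈ d.keys) :
    (pvStep cond d ch).keys = d.keys := by
  unfold pvStep
  by_cases hc : cond ch.2.1
  · have c1 : d.contains ch.2.2.1 = true := (PySem.Dict.contains_iff_mem_keys d _).mpr h1
    have c2 : (d.insert ch.2.2.1 true).contains ch.2.2.2 = true := by
      rw [PySem.Dict.contains_insert]
      simp [(PySem.Dict.contains_iff_mem_keys d _).mpr h2]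
    rw [if_pos hc, PySem.Dict.keys_insert_of_contains _ _ c2,
        PySem.Dict.keys_insert_of_contains _ _ c1]
  · simp [hc]

-- the whole fold preserves the key list when every channel's centers are keys
theorem pvFold_keys (cond : Int × Int → Bool)
    (chs : List (String × (Int × Int) × (String × String)))
    (d : PySem.Dict String Bool)
    (h : ∀ ch ∈ chs, ch.2.2.1 ∈ d.keys ∧ ch.2.2.2 ∈ d.keys) :
    (chs.foldl (pvStep cond) d).keys = d.keys := by
  induction chs generalizing d with
  | nil => rfl
  | cons c cs ih =>
    have hc := h c (by simp)
    have hk := pvStep_keys cond d c hc.1 hc.2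
    rw [List.foldl_cons, ih _ (fun ch hm => by rw [hk]; exact h ch (by simp [hm])), hk]

-- B's output list is a map over pvCenters: lets the two sides be compared center by center
theorem pvAlt_eq_map (ag : List Int) :
    gates_to_centers_py_alt ag
      = pvCenters.map (fun c =>
          (c, pvCenterChannels.foldr
                (fun cp acc => if cp.1 == c then
                    cp.2.any (fun p => ag.contains p.1 && ag.contains p.2) else acc) false)) := by
  unfold gates_to_centers_py_alt
  simp [pvCenterChannels, pvCenters]

-- ===== VERDICT (by name: the statement is the Claim_ definition above) =====
theorem gates_to_centers_py_spec : Claim_equal_gates_to_centers_py := by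
  intro ag _
  unfold Spec_gates_to_centers_py gates_to_centers_py
  show (pvChannels.foldl (pvStep (fun p => ag.contains p.1 && ag.contains p.2))
          (PySem.Dict.ofList (pvCenters.map (fun c => (c, false))))).items = _
  set cond : Int × Int → Bool := fun p => ag.contains p.1 && ag.contains p.2 with hcond
  set d0 := PySem.Dict.ofList (pvCenters.map (fun c => (c, false))) with hd0'
  have hkeys0 : d0.keys = pvCenters := by rw [hd0']; decide
  have hmem : ∀ ch ∈ pvChannels, ch.2.2.1 ∈ d0.keys ∧ ch.2.2.2 ∈ d0.keys := by
    rw [hkeys0]; decide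
  have hkeys : (pvChannels.foldl (pvStep cond) d0).keys = pvCenters := by
    rw [pvFold_keys cond pvChannels d0 hmem, hkeys0]
  have hnodup : (pvChannels.foldl (pvStep cond) d0).keys.Nodup := by
    rw [hkeys]; decide
  rw [PySem.Dict.items_eq_map_keys _ hnodup false, hkeys, pvAlt_eq_map]
  refine List.map_congr_left (fun c hcmem => ?_)
  rw [pvFold_getD]
  have hd0c : d0.getD c false = false := by
    fin_cases hcmem <;> rw [hd0'] <;> decide
  rw [hd0c, Bool.false_or]
  fin_cases hcmem <;>
    simp [pvChannels, pvCenterChannels, hcond, List.any_cons]
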